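-- pv_equiv track=rewrite | github.com/Rios07055/allsisten | Talller #1/taller1.py | suma_extremos
-- ===== SOURCE A (Python) =====
-- def suma_extremos(num1, num2, suma = 0):
--     if num1 == num2 == 0:
--         return suma
--     else:
--         mod1 = num1 % 10
--         mod2 = num2 % 10
--         if mod1 % 2 != 0:
--             suma += mod1
--         if mod2 % 2 == 0:
--             suma += mod2
--         return suma_extremos(num1//10, num2//10, suma)
--
-- num1 = 14678
--
-- num2 = 52579
-- ===== SOURCE B (Python) =====
-- def suma_extremos(num1, num2, suma=0):
--     # Iterative, decoupled version: sum odd digits of num1 and even digits of num2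
--     # in two independent while loops instead of one fused recursion.
--     while num1 > 0:
--         d = num1 % 10
--         if d % 2 != 0:
--             suma += d
--         num1 //= 10
--     while num2 > 0:
--         d = num2 % 10
--         if d % 2 == 0:
--             suma += d
--         num2 //= 10
--     return suma
-- ===== Notes on version B (the rewrite author's own statement) =====
-- stated objective: simpler
-- what changed: Replaces the fused tail recursion over both numbers with two independent iterative while loops (odd digits of num1, then even digits of num2), removing recursion entirely.
import Mathlib
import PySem

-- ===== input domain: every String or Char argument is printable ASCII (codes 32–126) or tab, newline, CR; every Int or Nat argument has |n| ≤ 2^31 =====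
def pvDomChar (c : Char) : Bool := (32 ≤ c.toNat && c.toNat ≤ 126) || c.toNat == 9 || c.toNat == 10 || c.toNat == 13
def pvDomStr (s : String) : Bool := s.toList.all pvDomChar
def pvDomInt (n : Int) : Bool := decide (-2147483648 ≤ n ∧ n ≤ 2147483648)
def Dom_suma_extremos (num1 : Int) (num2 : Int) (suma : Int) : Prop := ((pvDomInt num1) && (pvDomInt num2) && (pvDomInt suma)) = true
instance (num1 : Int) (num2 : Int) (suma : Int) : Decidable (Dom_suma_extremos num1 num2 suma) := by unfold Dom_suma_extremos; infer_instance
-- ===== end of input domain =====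

-- B replaces A's fused tail recursion by two independent iterative digit loops (simpler, no recursion); equal on nonnegative inputs (Pre_).

-- ===== PORT A =====
-- A's recursion never terminates for a negative argument (Python hits RecursionError);
-- the port uses a fuel bound that is always sufficient on Pre_ (nonnegative inputs).
def sumaFuelA (fuel : Nat) (num1 num2 suma : Int) : Int :=
  match fuel with
  | 0 => suma
  | f + 1 =>
    if num1 = 0 ∧ num2 = 0 then suma
    else
      let mod1 := PySem.Int.mod num1 10
      let mod2 := PySem.Int.mod num2 10
      let suma1 := if PySem.Int.mod mod1 2 ≠ 0 then suma + mod1 else suma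
      let suma2 := if PySem.Int.mod mod2 2 = 0 then suma1 + mod2 else suma1
      sumaFuelA f (PySem.Int.floordiv num1 10) (PySem.Int.floordiv num2 10) suma2

def suma_extremos (num1 : Int) (num2 : Int) (suma : Int) : Int :=
  sumaFuelA (num1.natAbs + num2.natAbs + 1) num1 num2 suma

-- ===== PORT B =====
-- first while loop of Source B: add odd digits of num1
def loopOdd (num1 suma : Int) : Int :=
  if _h : 0 < num1 then
    let d := PySem.Int.mod num1 10
    loopOdd (PySem.Int.floordiv num1 10) (if PySem.Int.mod d 2 ≠ 0 then suma + d else suma)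
  else suma
termination_by num1.toNat
decreasing_by
  rw [PySem.Int.floordiv_eq_ediv_of_pos (by norm_num : (0:Int) < 10)]; omega

-- second while loop of Source B: add even digits of num2
def loopEven (num2 suma : Int) : Int :=
  if _h : 0 < num2 then
    let d := PySem.Int.mod num2 10
    loopEven (PySem.Int.floordiv num2 10) (if PySem.Int.mod d 2 = 0 then suma + d else suma)
  else suma
termination_by num2.toNat
decreasing_by
  rw [PySem.Int.floordiv_eq_ediv_of_pos (by norm_num : (0:Int) < 10)]; omega

def suma_extremos_alt (num1 : Int) (num2 : Int) (suma : Int) : Int :=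
  loopEven num2 (loopOdd num1 suma)

-- ===== PRECONDITION & SPEC =====
-- A diverges (Python RecursionError) whenever num1 or num2 is negative, since n//10 never reaches 0 there.
def Pre_suma_extremos (num1 : Int) (num2 : Int) (suma : Int) : Prop := 0 ≤ num1 ∧ 0 ≤ num2
instance (num1 : Int) (num2 : Int) (suma : Int) : Decidable (Pre_suma_extremos num1 num2 suma) := by unfold Pre_suma_extremos; infer_instance
def pvWitness_suma_extremos : Int × Int × Int := (14678, 52579, 0)

def Spec_suma_extremos (num1 : Int) (num2 : Int) (suma : Int) (out : Int) : Prop := out = suma_extremos_alt num1 num2 suma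
instance (num1 : Int) (num2 : Int) (suma : Int) (out : Int) : Decidable (Spec_suma_extremos num1 num2 suma out) := by unfold Spec_suma_extremos; infer_instance

-- ===== CLAIM (what is proved, stated in full; the proofs are below) =====
def Claim_equal_suma_extremos : Prop := ∀ (num1 : Int) (num2 : Int) (suma : Int), Dom_suma_extremos num1 num2 suma → Pre_suma_extremos num1 num2 suma → Spec_suma_extremos num1 num2 suma (suma_extremos num1 num2 suma)

-- ===== LEMMAS AND PROOFS =====

theorem loopOdd_shift (k : Nat) : ∀ (n s c : Int), n.toNat ≤ k → loopOdd n (s + c) = loopOdd n s + c := by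
  induction k with
  | zero =>
    intro n s c h
    have hn : ¬ 0 < n := by omega
    conv_lhs => rw [loopOdd]
    conv_rhs => rw [loopOdd]
    simp [hn]
  | succ k ih =>
    intro n s c h
    by_cases hn : 0 < n
    · conv_lhs => rw [loopOdd]
      conv_rhs => rw [loopOdd]
      simp only [dif_pos hn]
      have harg : (if PySem.Int.mod (PySem.Int.mod n 10) 2 ≠ 0 then (s + c) + PySem.Int.mod n 10 else (s + c))
          = (if PySem.Int.mod (PySem.Int.mod n 10) 2 ≠ 0 then s + PySem.Int.mod n 10 else s) + c := by
        split_ifs <;> ring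
      rw [harg]
      apply ih
      rw [PySem.Int.floordiv_eq_ediv_of_pos (by norm_num : (0:Int) < 10)]
      omega
    · conv_lhs => rw [loopOdd]
      conv_rhs => rw [loopOdd]
      simp [hn]

theorem loopOdd_step (n s : Int) (hn : 0 ≤ n) :
    loopOdd n s = loopOdd (PySem.Int.floordiv n 10)
      (if PySem.Int.mod (PySem.Int.mod n 10) 2 ≠ 0 then s + PySem.Int.mod n 10 else s) := by
  by_cases h : 0 < n
  · conv_lhs => rw [loopOdd]
    simp [h]
  · have hz : n = 0 := by omega
    subst hz
    norm_num [PySem.Int.mod, PySem.Int.floordiv]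

theorem loopEven_step (n s : Int) (hn : 0 ≤ n) :
    loopEven n s = loopEven (PySem.Int.floordiv n 10)
      (if PySem.Int.mod (PySem.Int.mod n 10) 2 = 0 then s + PySem.Int.mod n 10 else s) := by
  by_cases h : 0 < n
  · conv_lhs => rw [loopEven]
    simp [h]
  · have hz : n = 0 := by omega
    subst hz
    norm_num [PySem.Int.mod, PySem.Int.floordiv]

theorem sumaFuelA_eq (f : Nat) : ∀ (n1 n2 s : Int), 0 ≤ n1 → 0 ≤ n2 → n1.toNat + n2.toNat < f →
    sumaFuelA f n1 n2 s = loopEven n2 (loopOdd n1 s) := by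
  induction f with
  | zero => intro n1 n2 s _ _ h; omega
  | succ f ih =>
    intro n1 n2 s h1 h2 hf
    rw [sumaFuelA]
    by_cases hz : n1 = 0 ∧ n2 = 0
    · obtain ⟨e1, e2⟩ := hz
      subst e1; subst e2
      norm_num
      conv_rhs => rw [loopOdd]
      norm_num
      conv_rhs => rw [loopEven]
      norm_num
    · simp only [if_neg hz]
      have hd1 : PySem.Int.floordiv n1 10 = n1 / 10 :=
        PySem.Int.floordiv_eq_ediv_of_pos (by norm_num)
      have hd2 : PySem.Int.floordiv n2 10 = n2 / 10 :=
        PySem.Int.floordiv_eq_ediv_of_pos (by norm_num)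
      have hrec := ih (PySem.Int.floordiv n1 10) (PySem.Int.floordiv n2 10)
        (if PySem.Int.mod (PySem.Int.mod n2 10) 2 = 0 then
            (if PySem.Int.mod (PySem.Int.mod n1 10) 2 ≠ 0 then s + PySem.Int.mod n1 10 else s) + PySem.Int.mod n2 10
          else (if PySem.Int.mod (PySem.Int.mod n1 10) 2 ≠ 0 then s + PySem.Int.mod n1 10 else s))
        (by rw [hd1]; omega) (by rw [hd2]; omega)
        (by rw [hd1, hd2]; omega)
      rw [hrec]
      -- now rewrite the RHS one step on each loop
      rw [loopOdd_step n1 s h1, loopEven_step n2 _ h2]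
      congr 1
      set sA := (if PySem.Int.mod (PySem.Int.mod n1 10) 2 ≠ 0 then s + PySem.Int.mod n1 10 else s) with hsA
      by_cases hp : PySem.Int.mod (PySem.Int.mod n2 10) 2 = 0
      · simp only [if_pos hp]
        rw [loopOdd_shift ((PySem.Int.floordiv n1 10).toNat) _ sA (PySem.Int.mod n2 10) le_rfl]
      · simp only [if_neg hp]

-- ===== VERDICT (by name: the statement is the Claim_ definition above) =====
theorem suma_extremos_spec : Claim_equal_suma_extremos := by
  intro n1 n2 s _ hpre
  obtain ⟨h1, h2⟩ := hpre
  unfold Spec_suma_extremos suma_extremos suma_extremos_alt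
  exact sumaFuelA_eq (n1.natAbs + n2.natAbs + 1) n1 n2 s h1 h2 (by omega)
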